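-- pv_equiv track=rewrite | github.com/ericlasry/CNNs-for-Activity-Cliff-Prediction | superpac/eval.py | get_confusion_indices
-- ===== SOURCE A (Python) =====
-- def get_confusion_indices(preds,vals):
--     mis_ac = []
--     cor_ac = []
--     mis_nac = []
--     cor_nac = []
--
--     for count, val in enumerate(vals):
--         if (val == 0):
--             if preds[count] == 0:
--                 cor_nac.append(count)
--             elif preds[count] == 1:
--                 mis_nac.append(count)
--         elif (val == 1):
--             if preds[count] == 0:
--                 mis_ac.append(count)
--             elif preds[count] == 1:
--                 cor_ac.append(count)
--     return cor_nac, mis_nac, mis_ac, cor_ac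
-- ===== SOURCE B (Python) =====
-- def get_confusion_indices(preds, vals):
--     cor_nac = [i for i, v in enumerate(vals) if v == 0 and preds[i] == 0]
--     mis_nac = [i for i, v in enumerate(vals) if v == 0 and preds[i] == 1]
--     mis_ac  = [i for i, v in enumerate(vals) if v == 1 and preds[i] == 0]
--     cor_ac  = [i for i, v in enumerate(vals) if v == 1 and preds[i] == 1]
--     return cor_nac, mis_nac, mis_ac, cor_ac
-- ===== Notes on version B (the rewrite author's own statement) =====
-- stated objective: idiomatic
-- what changed: Replaces the single classifying loop with four mutable accumulator lists by four independent filtering list comprehensions over enumerate(vals), one per confusion bucket.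
import Mathlib
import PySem

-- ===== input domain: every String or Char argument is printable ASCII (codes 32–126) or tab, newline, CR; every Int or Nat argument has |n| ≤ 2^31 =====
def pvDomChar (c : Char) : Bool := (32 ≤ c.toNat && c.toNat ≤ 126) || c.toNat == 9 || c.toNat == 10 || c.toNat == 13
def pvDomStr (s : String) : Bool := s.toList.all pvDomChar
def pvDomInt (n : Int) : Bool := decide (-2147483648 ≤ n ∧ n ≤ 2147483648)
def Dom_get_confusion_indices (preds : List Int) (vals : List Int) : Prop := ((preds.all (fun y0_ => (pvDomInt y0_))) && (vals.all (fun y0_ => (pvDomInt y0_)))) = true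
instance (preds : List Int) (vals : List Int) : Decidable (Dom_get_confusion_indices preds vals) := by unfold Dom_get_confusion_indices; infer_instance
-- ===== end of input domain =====

-- B replaces A's single classifying loop with four independent filtering comprehensions
-- (one per confusion bucket) — idiomatic, same cost; return value only, no mutation involved.

-- ===== PORT A =====
-- A's single loop: state (cor_nac, mis_nac, mis_ac, cor_ac), append the index to the bucket
-- selected by (val, preds[count]).  preds[count] is ported as pyGetD with default 0; Pre_
-- excludes exactly the inputs where Python would raise IndexError, so the default is never used
-- on admitted inputs.
def get_confusion_indices (preds : List Int) (vals : List Int) : List Int × List Int × List Int × List Int :=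
  (PySem.List.enumerate vals 0).foldl (fun (acc : List Int × List Int × List Int × List Int) (cv : Int × Int) =>
    let (cor_nac, mis_nac, mis_ac, cor_ac) := acc
    if cv.2 = 0 then
      if PySem.List.pyGetD preds cv.1 0 = 0 then (cor_nac ++ [cv.1], mis_nac, mis_ac, cor_ac)
      else if PySem.List.pyGetD preds cv.1 0 = 1 then (cor_nac, mis_nac ++ [cv.1], mis_ac, cor_ac)
      else acc
    else if cv.2 = 1 then
      if PySem.List.pyGetD preds cv.1 0 = 0 then (cor_nac, mis_nac, mis_ac ++ [cv.1], cor_ac)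
      else if PySem.List.pyGetD preds cv.1 0 = 1 then (cor_nac, mis_nac, mis_ac, cor_ac ++ [cv.1])
      else acc
    else acc) ([], [], [], [])

-- ===== PORT B =====
-- one comprehension per bucket, each filtering enumerate(vals) on its exact (v, preds[i]) pair
def pvBucket (preds : List Int) (vals : List Int) (v p : Int) : List Int :=
  ((PySem.List.enumerate vals 0).filter
    (fun q => q.2 == v && PySem.List.pyGetD preds q.1 0 == p)).map Prod.fst

def get_confusion_indices_alt (preds : List Int) (vals : List Int) : List Int × List Int × List Int × List Int :=
  (pvBucket preds vals 0 0, pvBucket preds vals 0 1, pvBucket preds vals 1 0, pvBucket preds vals 1 1)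

-- ===== PRECONDITION & SPEC =====
-- Pre_ excludes exactly the inputs where Python A raises IndexError: an index i with
-- vals[i] ∈ {0, 1} but i out of range for preds (both A and B raise identically there).
def Pre_get_confusion_indices (preds : List Int) (vals : List Int) : Prop :=
  ∀ i : Nat, i < vals.length → (vals.getD i 0 = 0 ∨ vals.getD i 0 = 1) → i < preds.length
instance (preds : List Int) (vals : List Int) : Decidable (Pre_get_confusion_indices preds vals) := by unfold Pre_get_confusion_indices; infer_instance

def pvWitness_get_confusion_indices : List Int × List Int := ([0, 1, 1], [1, 0, 2])

def Spec_get_confusion_indices (preds : List Int) (vals : List Int) (out : List Int × List Int × List Int × List Int) : Prop := out = get_confusion_indices_alt preds vals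
instance (preds : List Int) (vals : List Int) (out : List Int × List Int × List Int × List Int) : Decidable (Spec_get_confusion_indices preds vals out) := by unfold Spec_get_confusion_indices; infer_instance

-- ===== CLAIM (what is proved, stated in full; the proofs are below) =====
def Claim_equal_get_confusion_indices : Prop := ∀ (preds : List Int) (vals : List Int), Dom_get_confusion_indices preds vals → Pre_get_confusion_indices preds vals → Spec_get_confusion_indices preds vals (get_confusion_indices preds vals)

-- ===== LEMMAS AND PROOFS =====

-- the common filter of bucket (v, p), over an arbitrary enumerated list
def pvBkt (preds : List Int) (v p : Int) (e : List (Int × Int)) : List Int :=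
  (e.filter (fun q => q.2 == v && PySem.List.pyGetD preds q.1 0 == p)).map Prod.fst

-- loop invariant: A's fold over any enumerated list e, started from any accumulator,
-- appends exactly the four bucket filters of e.
theorem pv_fold_eq (preds : List Int) (e : List (Int × Int))
    (a b c d : List Int) :
    e.foldl (fun (acc : List Int × List Int × List Int × List Int) (cv : Int × Int) =>
      let (cor_nac, mis_nac, mis_ac, cor_ac) := acc
      if cv.2 = 0 then
        if PySem.List.pyGetD preds cv.1 0 = 0 then (cor_nac ++ [cv.1], mis_nac, mis_ac, cor_ac)
        else if PySem.List.pyGetD preds cv.1 0 = 1 then (cor_nac, mis_nac ++ [cv.1], mis_ac, cor_ac)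
        else acc
      else if cv.2 = 1 then
        if PySem.List.pyGetD preds cv.1 0 = 0 then (cor_nac, mis_nac, mis_ac ++ [cv.1], cor_ac)
        else if PySem.List.pyGetD preds cv.1 0 = 1 then (cor_nac, mis_nac, mis_ac, cor_ac ++ [cv.1])
        else acc
      else acc) (a, b, c, d)
    = (a ++ pvBkt preds 0 0 e, b ++ pvBkt preds 0 1 e,
       c ++ pvBkt preds 1 0 e, d ++ pvBkt preds 1 1 e) := by
  induction e generalizing a b c d with
  | nil => simp [pvBkt]
  | cons hd tl ih =>
    simp only [List.foldl_cons]
    by_cases h0 : hd.2 = 0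
    · by_cases hp0 : PySem.List.pyGetD preds hd.1 0 = 0
      · simp [h0, hp0, ih, pvBkt]
      · by_cases hp1 : PySem.List.pyGetD preds hd.1 0 = 1
        · simp [h0, hp1, ih, pvBkt]
        · simp [h0, hp0, hp1, ih, pvBkt]
    · by_cases h1 : hd.2 = 1
      · by_cases hp0 : PySem.List.pyGetD preds hd.1 0 = 0
        · simp [h1, hp0, ih, pvBkt]
        · by_cases hp1 : PySem.List.pyGetD preds hd.1 0 = 1
          · simp [h1, hp1, ih, pvBkt]
          · simp [h1, hp0, hp1, ih, pvBkt]
      · simp [h0, h1, ih, pvBkt]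

-- ===== VERDICT (by name: the statement is the Claim_ definition above) =====
theorem get_confusion_indices_spec : Claim_equal_get_confusion_indices := by
  intro preds vals _ _
  unfold Spec_get_confusion_indices get_confusion_indices get_confusion_indices_alt pvBucket
  rw [pv_fold_eq]
  simp [pvBkt]
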